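-- pv_equiv track=rewrite | github.com/navoday-91/PythonPractice | orig.py | orignial
-- ===== SOURCE A (Python) =====
-- def orignial(input1):
--     s= input1[0:1]
--     for i in range(1, len(input1), 2):
--         s += input1[i:i+1]
--     s = s[::-1]
--     for i in range(2,len(input1),2):
--         s += input1[i:i+1]
--     if len(input1) % 2 == 0:
--         return s[::-1]
--     else:
--         return s
-- ===== SOURCE B (Python) =====
-- def orignial(input1):
--     evens = input1[::2]
--     odds = input1[1::2]
--     if len(input1) % 2 == 0:
--         return evens[::-1] + odds
--     return odds[::-1] + input1[:1] + evens[1:]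
-- ===== Notes on version B (the rewrite author's own statement) =====
-- stated objective: faster
-- what changed: Replaces A's two index-stepping character-append loops with double string reversal by two parity slices (input1[::2], input1[1::2]) assembled in one branch.
import Mathlib
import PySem

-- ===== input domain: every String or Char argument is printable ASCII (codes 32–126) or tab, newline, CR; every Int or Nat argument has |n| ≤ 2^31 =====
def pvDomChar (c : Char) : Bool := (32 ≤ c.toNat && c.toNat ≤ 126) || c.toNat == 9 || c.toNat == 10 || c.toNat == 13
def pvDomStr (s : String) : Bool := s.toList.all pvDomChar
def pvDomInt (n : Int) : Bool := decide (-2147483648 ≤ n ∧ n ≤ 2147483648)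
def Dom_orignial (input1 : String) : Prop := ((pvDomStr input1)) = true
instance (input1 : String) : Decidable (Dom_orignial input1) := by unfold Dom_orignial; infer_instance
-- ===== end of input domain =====

-- B replaces A's two index-stepping append loops plus double reversal by two parity
-- slices (input1[::2], input1[1::2]) assembled in one branch: simpler, same values.

-- ===== PORT A =====
def orignial (input1 : String) : String :=
  let cs := input1.toList
  -- s = input1[0:1]
  let s0 := PySem.List.slice cs (some 0) (some 1)
  -- for i in range(1, len(input1), 2): s += input1[i:i+1]
  let s1 := (PySem.List.pyRange 1 (cs.length : Int) 2).foldl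
      (fun acc i => acc ++ PySem.List.slice cs (some i) (some (i + 1))) s0
  -- s = s[::-1]
  let s2 := (PySem.List.slice? s1 none none (-1)).getD []
  -- for i in range(2, len(input1), 2): s += input1[i:i+1]
  let s3 := (PySem.List.pyRange 2 (cs.length : Int) 2).foldl
      (fun acc i => acc ++ PySem.List.slice cs (some i) (some (i + 1))) s2
  if cs.length % 2 == 0 then String.ofList ((PySem.List.slice? s3 none none (-1)).getD [])
  else String.ofList s3

-- ===== PORT B =====
def orignial_alt (input1 : String) : String :=
  let cs := input1.toList
  let evens := (PySem.List.slice? cs none none 2).getD []        -- evens = input1[::2]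
  let odds := (PySem.List.slice? cs (some 1) none 2).getD []     -- odds = input1[1::2]
  if cs.length % 2 == 0 then
    String.ofList (((PySem.List.slice? evens none none (-1)).getD []) ++ odds)
  else
    String.ofList (((PySem.List.slice? odds none none (-1)).getD [])
      ++ PySem.List.slice cs none (some 1)        -- + input1[:1]
      ++ PySem.List.slice evens (some 1) none)    -- + evens[1:]

-- ===== PRECONDITION & SPEC =====
def Spec_orignial (input1 : String) (out : String) : Prop := out = orignial_alt input1
instance (input1 : String) (out : String) : Decidable (Spec_orignial input1 out) := by unfold Spec_orignial; infer_instance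

-- ===== CLAIM (what is proved, stated in full; the proofs are below) =====
def Claim_equal_orignial : Prop := ∀ (input1 : String), Dom_orignial input1 → Spec_orignial input1 (orignial input1)

-- ===== LEMMAS AND PROOFS =====

-- the even-index subsequence xs[0], xs[2], xs[4], …
def eo {α : Type} : List α → List α
  | [] => []
  | [a] => [a]
  | a :: _ :: t => a :: eo t

theorem eo_head {α : Type} (cs : List α) : eo cs = cs.take 1 ++ eo (cs.drop 2) := by
  match cs with
  | [] => rfl
  | [a] => rfl
  | a :: b :: t => rfl

theorem eo_tail {α : Type} (cs : List α) : (eo cs).drop 1 = eo (cs.drop 2) := by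
  match cs with
  | [] => rfl
  | [a] => rfl
  | a :: b :: t => rfl

theorem filterMap_eo {α : Type} (n : Nat) (cs : List α) :
    List.filterMap (fun k => cs[2 * k]?) (List.range n) = eo (cs.take (2 * n)) := by
  induction n generalizing cs with
  | zero => simp [eo]
  | succ n ih =>
    rw [List.range_succ_eq_map, List.filterMap_cons]
    match cs with
    | [] => simp [eo]
    | [a] =>
      simp only [Nat.mul_zero, List.getElem?_cons_zero, List.filterMap_map]
      have h2 : List.filterMap ((fun k => ([a] : List α)[2 * k]?) ∘ Nat.succ) (List.range n) = [] := by
        apply List.filterMap_eq_nil_iff.mpr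
        intro k _
        show ([a] : List α)[2 * Nat.succ k]? = none
        rw [List.getElem?_eq_none_iff]
        simp; omega
      rw [h2]
      rw [List.take_of_length_le (by simp only [List.length_cons, List.length_nil]; omega)]
      rfl
    | a :: b :: t =>
      simp only [Nat.mul_zero, List.getElem?_cons_zero, List.filterMap_map]
      have h2 : List.filterMap ((fun k => (a :: b :: t)[2 * k]?) ∘ Nat.succ) (List.range n)
          = List.filterMap (fun k => t[2 * k]?) (List.range n) := by
        apply List.filterMap_congr
        intro k _
        have h : 2 * Nat.succ k = (2 * k) + 1 + 1 := by omega
        simp [Function.comp, h]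
      rw [h2, ih]
      have h3 : 2 * (n + 1) = (2 * n) + 1 + 1 := by omega
      simp [h3, eo, List.take_succ_cons]

theorem take_one_drop {α : Type} (cs : List α) (m : Nat) :
    (cs.drop m).take 1 = (cs[m]?).toList := by
  induction cs generalizing m with
  | nil => simp
  | cons a t ih =>
    cases m with
    | zero => simp
    | succ m => simpa using ih m

theorem flatMap_toList_eq_filterMap {α β : Type} (f : α → Option β) (l : List α) :
    l.flatMap (fun x => (f x).toList) = l.filterMap f := by
  induction l with
  | nil => rfl
  | cons a t ih =>
    rw [List.flatMap_cons, List.filterMap_cons, ih]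
    cases f a <;> simp

-- A's append loop over range(a, len, 2) collects the every-other subsequence from index a
theorem loopA {α : Type} (cs : List α) (a : Nat) (init : List α) :
    (PySem.List.pyRange (a : Int) (cs.length : Int) 2).foldl
      (fun acc i => acc ++ PySem.List.slice cs (some i) (some (i + 1))) init
    = init ++ eo (cs.drop a) := by
  rw [PySem.List.foldl_append_eq_flatMap]
  congr 1
  rw [PySem.List.pyRange]
  split
  · omega
  by_cases hlt : (a : Int) < (cs.length : Int)
  · have hpos : (0 : Int) < 2 := by omega
    simp only [hpos, if_pos, hlt]
    have hcount : (((cs.length : Int) - (a : Int) + 2 - 1) / 2).toNat = (cs.length - a + 1) / 2 := by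
      omega
    rw [hcount, List.flatMap_map]
    have hbody : ∀ k ∈ List.range ((cs.length - a + 1) / 2),
        (fun k : Nat => PySem.List.slice cs (some ((a : Int) + 2 * (k : Int))) (some ((a : Int) + 2 * (k : Int) + 1))) k
        = (fun k : Nat => ((cs.drop a)[2 * k]?).toList) k := by
      intro k _
      have hstep : ((a : Int) + 2 * (k : Int)) = ((a + 2 * k : Nat) : Int) := by push_cast; ring
      simp only [hstep]
      have h1 : ((a + 2 * k : Nat) : Int) + 1 = ((a + 2 * k + 1 : Nat) : Int) := by push_cast; ring
      rw [h1, PySem.List.slice_natCast]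
      have h2 : a + 2 * k + 1 - (a + 2 * k) = 1 := by omega
      rw [h2, take_one_drop]
      congr 1
      rw [List.getElem?_drop]
    rw [List.flatMap_congr hbody, flatMap_toList_eq_filterMap, filterMap_eo]
    congr 1
    have hlen : (cs.drop a).length ≤ 2 * ((cs.length - a + 1) / 2) := by
      simp; omega
    exact List.take_of_length_le hlen
  · have hpos : (0 : Int) < 2 := by omega
    rw [if_pos hpos, if_neg hlt]
    have hd : cs.drop a = [] := by
      apply List.drop_eq_nil_of_le; omega
    simp [hd, eo]

-- input1[::2] is the even-index subsequence
theorem slice_step2 {α : Type} (cs : List α) :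
    (PySem.List.slice? cs none none 2).getD [] = eo cs := by
  rw [PySem.List.slice?, PySem.List.sliceIndices]
  norm_num
  have hidx : ∀ x : Nat, ((2 : Int) * (x : Int)).toNat = 2 * x := by intro x; omega
  simp only [hidx]
  by_cases h : 0 < cs.length
  · rw [if_pos h, filterMap_eo]
    congr 1
    apply List.take_of_length_le
    omega
  · rw [if_neg h]
    have hnil : cs = [] := by
      cases cs with
      | nil => rfl
      | cons a t => simp at h
    simp [hnil, eo]

-- input1[1::2] is the odd-index subsequence
theorem slice_step2_from1 {α : Type} (cs : List α) :
    (PySem.List.slice? cs (some 1) none 2).getD [] = eo (cs.drop 1) := by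
  rw [PySem.List.slice?, PySem.List.sliceIndices]
  norm_num
  by_cases h : 1 < cs.length
  · rw [if_pos h]
    have hmin : min (1 : Int) (cs.length : Int) = 1 := by omega
    simp only [hmin]
    have hidx : ∀ x ∈ List.range (((cs.length : Int) - 1 + 2 - 1) / 2).toNat,
        (fun x : Nat => cs[((1 : Int) + 2 * (x : Int)).toNat]?) x
        = (fun x : Nat => (cs.drop 1)[2 * x]?) x := by
      intro x _
      simp only [List.getElem?_drop]
      have hx : ((1 : Int) + 2 * (x : Int)).toNat = 1 + 2 * x := by omega
      rw [hx]
    rw [List.filterMap_congr hidx, filterMap_eo]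
    congr 1
    rw [← List.drop_one]
    apply List.take_of_length_le
    simp only [List.length_drop]
    omega
  · rw [if_neg h]
    have hd : cs.drop 1 = [] := by
      apply List.drop_eq_nil_of_le; omega
    rw [List.range_zero, List.filterMap_nil, ← List.drop_one, hd]
    rfl

theorem take_one_reverse {α : Type} (cs : List α) : (cs.take 1).reverse = cs.take 1 := by
  cases cs <;> simp

theorem slice_take1 {α : Type} (cs : List α) : PySem.List.slice cs none (some 1) = cs.take 1 := by
  rw [PySem.List.slice_to cs (by norm_num : (0:Int) ≤ 1)]
  rfl

theorem slice_drop1 {α : Type} (cs : List α) : PySem.List.slice cs (some 1) none = cs.drop 1 := by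
  rw [PySem.List.slice_from cs (by norm_num : (0:Int) ≤ 1)]
  rfl

theorem loopA1 {α : Type} (cs init : List α) :
    (PySem.List.pyRange 1 (cs.length : Int) 2).foldl
      (fun acc i => acc ++ PySem.List.slice cs (some i) (some (i + 1))) init
    = init ++ eo (cs.drop 1) := by
  simpa using loopA cs 1 init

theorem loopA2 {α : Type} (cs init : List α) :
    (PySem.List.pyRange 2 (cs.length : Int) 2).foldl
      (fun acc i => acc ++ PySem.List.slice cs (some i) (some (i + 1))) init
    = init ++ eo (cs.drop 2) := by
  simpa using loopA cs 2 init

-- ===== VERDICT (by name: the statement is the Claim_ definition above) =====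
theorem orignial_spec : Claim_equal_orignial := by
  unfold Claim_equal_orignial
  intro input1 _
  unfold Spec_orignial orignial orignial_alt
  simp only [slice_step2, slice_step2_from1, PySem.List.slice_zero_start, slice_take1,
    slice_drop1, loopA1, loopA2, PySem.List.slice?_none_none_neg_one, Option.getD_some]
  set cs := input1.toList with hcs
  by_cases hpar : cs.length % 2 == 0
  · rw [if_pos hpar, if_pos hpar]
    congr 1
    rw [eo_head cs]
    simp [List.reverse_append, take_one_reverse, List.append_assoc]
  · rw [if_neg hpar, if_neg hpar]
    congr 1
    rw [← eo_tail cs, List.drop_one]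
    simp [List.reverse_append, take_one_reverse, List.append_assoc, List.drop_one]
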